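-- pv_equiv track=rewrite | github.com/yue-w/LeetCode | Algorithms/930. Binary Subarrays With Sum.py | pre_sum
-- ===== SOURCE A (Python) =====
-- from collections import defaultdict
--
-- def pre_sum(nums, goal):
--     pre_count = defaultdict(int)
--     pre_count[0] = 1
--     pre_sum = 0
--     rst = 0
--     for i in range(len(nums)):
--         pre_sum += nums[i]
--         need = pre_sum - goal
--         rst += pre_count[need]
--         pre_count[pre_sum] += 1
--     return rst
-- ===== SOURCE B (Python) =====
-- def pre_sum(nums, goal):
--     count = 0
--     n = len(nums)
--     for i in range(n):
--         s = 0
--         for j in range(i, n):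
--             s += nums[j]
--             if s == goal:
--                 count += 1
--     return count
-- ===== Notes on version B (the rewrite author's own statement) =====
-- stated objective: alternative
-- what changed: Replaced the one-pass prefix-sum frequency dictionary with a brute-force double loop that re-sums every subarray and counts those summing to goal.
import Mathlib
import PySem

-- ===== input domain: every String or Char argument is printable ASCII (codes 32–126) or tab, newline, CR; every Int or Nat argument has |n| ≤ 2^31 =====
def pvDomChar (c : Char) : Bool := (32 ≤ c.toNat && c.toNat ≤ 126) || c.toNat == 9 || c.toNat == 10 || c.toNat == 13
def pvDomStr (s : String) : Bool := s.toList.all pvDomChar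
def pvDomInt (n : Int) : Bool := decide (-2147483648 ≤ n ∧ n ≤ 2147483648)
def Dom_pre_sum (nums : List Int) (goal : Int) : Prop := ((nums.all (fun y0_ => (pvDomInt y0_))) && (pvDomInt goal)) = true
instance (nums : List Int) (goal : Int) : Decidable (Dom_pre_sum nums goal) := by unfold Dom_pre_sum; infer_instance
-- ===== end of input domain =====

-- B replaces A's one-pass prefix-sum frequency dictionary with a brute-force double loop
-- re-summing every subarray; same return value on every input (objective: alternative, not faster).

-- ===== PORT A =====
-- A's loop body; reads of the defaultdict are ported as getD _ _ 0 (a defaultdict read of a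
-- missing key inserts it with value 0, which changes no later default-0 read nor the result).
-- Indices drawn from range(len(nums)) are always in range, so pyGetD is exact here.
def preSumStepA (goal : Int) (st : PySem.Dict Int Int × Int × Int) (v : Int) :
    PySem.Dict Int Int × Int × Int :=
  let ps := st.2.1 + v
  let need := ps - goal
  let rst := st.2.2 + st.1.getD need 0
  (st.1.insert ps (st.1.getD ps 0 + 1), ps, rst)

def pre_sum (nums : List Int) (goal : Int) : Int :=
  ((PySem.List.pyRange 0 (nums.length : Int) 1).foldl
    (fun st i => preSumStepA goal st (PySem.List.pyGetD nums i 0))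
    (PySem.Dict.empty.insert 0 1, 0, 0)).2.2

-- ===== PORT B =====
-- inner loop body of B: s += nums[j]; if s == goal: count += 1
def preSumStepB (goal : Int) (sc : Int × Int) (v : Int) : Int × Int :=
  let s := sc.1 + v
  (s, if s = goal then sc.2 + 1 else sc.2)

def pre_sum_alt (nums : List Int) (goal : Int) : Int :=
  (PySem.List.pyRange 0 (nums.length : Int) 1).foldl
    (fun count i =>
      ((PySem.List.pyRange i (nums.length : Int) 1).foldl
        (fun sc j => preSumStepB goal sc (PySem.List.pyGetD nums j 0))
        (0, count)).2)
    0

-- ===== PRECONDITION & SPEC =====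
def Spec_pre_sum (nums : List Int) (goal : Int) (out : Int) : Prop := out = pre_sum_alt nums goal
instance (nums : List Int) (goal : Int) (out : Int) : Decidable (Spec_pre_sum nums goal out) := by unfold Spec_pre_sum; infer_instance

-- ===== CLAIM (what is proved, stated in full; the proofs are below) =====
def Claim_equal_pre_sum : Prop := ∀ (nums : List Int) (goal : Int), Dom_pre_sum nums goal → Spec_pre_sum nums goal (pre_sum nums goal)

-- ===== LEMMAS AND PROOFS =====

-- Npre g s ys = number of nonempty prefixes p of ys with s + p.sum = g
def Npre (g s : Int) : List Int → Int
  | [] => 0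
  | v :: t => (if s + v = g then 1 else 0) + Npre g (s + v) t

-- G g hist ps ys : what A's loop adds to rst when run over ys from prefix sum ps,
-- with the dict holding the multiset hist of earlier prefix sums
def G (g : Int) (hist : List Int) (ps : Int) : List Int → Int
  | [] => 0
  | v :: t => (hist.count (ps + v - g) : Int) + G g (hist ++ [ps + v]) (ps + v) t

-- H g x ps ys : contribution of the single dict entry x
def H (g x ps : Int) : List Int → Int
  | [] => 0
  | v :: t => (if ps + v - g = x then 1 else 0) + H g x (ps + v) t

-- K g ps ys : pairs among prefix sums created while running over ys
def K (g ps : Int) : List Int → Int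
  | [] => 0
  | v :: t => H g (ps + v) (ps + v) t + K g (ps + v) t

-- Bsum' g ys = Σ_{k < |ys|} Npre g 0 (ys.drop (k+1))
def Bsum' (g : Int) : List Int → Int
  | [] => 0
  | _ :: t => Npre g 0 t + Bsum' g t

-- (hist.count c : Int) written as a 0/1 sum over hist
theorem count_map_ite (c : Int) (l : List Int) :
    (l.map (fun x => if c = x then (1 : Int) else 0)).sum = (l.count c : Int) := by
  induction l with
  | nil => simp
  | cons a t ih =>
    by_cases h : c = a
    · subst h
      simp only [List.map_cons, List.sum_cons, List.count_cons_self, ih]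
      push_cast
      ring
    · simp [if_neg h, ih, Ne.symm h]

def Bsum (g : Int) (ys : List Int) : Int :=
  ((List.range ys.length).map (fun k => Npre g 0 (ys.drop k))).sum

theorem innerB_snd (g : Int) (ys : List Int) : ∀ s c,
    (ys.foldl (preSumStepB g) (s, c)).2 = c + Npre g s ys := by
  induction ys with
  | nil => intro s c; simp [Npre]
  | cons v t ih =>
    intro s c
    simp only [List.foldl_cons, Npre, preSumStepB, ih]
    split_ifs <;> ring

theorem H_eq_Npre (g x : Int) (ys : List Int) : ∀ ps, H g x ps ys = Npre g (ps - x) ys := by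
  induction ys with
  | nil => intro ps; rfl
  | cons v t ih =>
    intro ps
    simp only [H, Npre, ih]
    have hiff : (ps + v - g = x) ↔ (ps - x + v = g) := by omega
    have harg : ps + v - x = ps - x + v := by ring
    rw [if_congr hiff rfl rfl, harg]

theorem G_decompose (g : Int) (ys : List Int) : ∀ hist ps,
    G g hist ps ys = (hist.map (fun x => H g x ps ys)).sum + K g ps ys := by
  induction ys with
  | nil => intro hist ps; simp [G, H, K]
  | cons v t ih =>
    intro hist ps
    simp only [G, K, ih, List.map_append, List.sum_append, List.map_cons, List.map_nil,
      List.sum_cons, List.sum_nil, H]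
    have hsplit := PySem.List.sum_map_add_int hist
      (fun x => if ps + v - g = x then (1 : Int) else 0) (fun x => H g x (ps + v) t)
    linarith [count_map_ite (ps + v - g) hist]

theorem K_eq_Bsum' (g : Int) (ys : List Int) : ∀ ps, K g ps ys = Bsum' g ys := by
  induction ys with
  | nil => intro ps; rfl
  | cons v t ih =>
    intro ps
    simp only [K, Bsum', ih, H_eq_Npre]
    congr 1
    simp

theorem Bsum_cons (g v : Int) (t : List Int) : Bsum g (v :: t) = Npre g 0 (v :: t) + Bsum g t := by
  simp only [Bsum, List.length_cons, List.range_succ_eq_map, List.map_cons, List.sum_cons,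
    List.map_map, List.drop_zero]
  rfl

theorem Bsum_eq (g : Int) (ys : List Int) : Bsum g ys = Npre g 0 ys + Bsum' g ys := by
  induction ys with
  | nil => simp [Bsum, Bsum', Npre]
  | cons v t ih => rw [Bsum_cons, Bsum', ih]

theorem foldA_counter (g : Int) (ys : List Int) : ∀ hist ps rst,
    (ys.foldl (preSumStepA g) (PySem.Dict.counter hist, ps, rst)).2.2 = rst + G g hist ps ys := by
  induction ys with
  | nil => intro hist ps rst; simp [G]
  | cons v t ih =>
    intro hist ps rst
    have hins : (PySem.Dict.counter hist).insert (ps + v)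
        ((PySem.Dict.counter hist).getD (ps + v) 0 + 1) = PySem.Dict.counter (hist ++ [ps + v]) := by
      rw [← PySem.Dict.foldl_insert_getD_add_one_eq_counter,
          ← PySem.Dict.foldl_insert_getD_add_one_eq_counter, List.foldl_append, List.foldl_cons,
          List.foldl_nil]
    simp only [List.foldl_cons, preSumStepA]
    rw [hins, ih]
    simp only [PySem.Dict.getD_counter, G]
    ring

theorem A_eq_G (nums : List Int) (goal : Int) : pre_sum nums goal = G goal [0] 0 nums := by
  unfold pre_sum
  rw [PySem.List.foldl_pyRange_zero_pyGetD' nums 0 (preSumStepA goal)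
    (PySem.Dict.empty.insert 0 1, 0, 0)]
  have h0 : (PySem.Dict.empty.insert 0 1 : PySem.Dict Int Int) = PySem.Dict.counter [0] := by
    decide
  rw [h0, foldA_counter]
  ring

theorem B_eq_Bsum (nums : List Int) (goal : Int) : pre_sum_alt nums goal = Bsum goal nums := by
  unfold pre_sum_alt
  have hcongr : (PySem.List.pyRange 0 (nums.length : Int) 1).foldl
      (fun count i =>
        ((PySem.List.pyRange i (nums.length : Int) 1).foldl
          (fun sc j => preSumStepB goal sc (PySem.List.pyGetD nums j 0)) (0, count)).2) 0
      = (PySem.List.pyRange 0 (nums.length : Int) 1).foldl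
      (fun count i => count + Npre goal 0 (nums.drop i.toNat)) 0 := by
    apply PySem.List.foldl_congr_mem
    intro acc i hi
    have h0i : 0 ≤ i := (PySem.List.mem_pyRange_one.mp hi).1
    rw [PySem.List.foldl_pyRange_pyGetD' nums 0 (preSumStepB goal) (0, acc) h0i,
      innerB_snd]
  rw [hcongr, PySem.List.foldl_add, PySem.List.pyRange_one]
  simp only [Int.sub_zero, List.map_map, Bsum, zero_add]
  exact congrArg List.sum (List.map_congr_left (fun k hk => by simp [Function.comp]))
theorem A_eq_B (nums : List Int) (goal : Int) : pre_sum nums goal = pre_sum_alt nums goal := by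
  rw [A_eq_G, B_eq_Bsum, Bsum_eq]
  have h1 : G goal [0] 0 nums = H goal 0 0 nums + K goal 0 nums := by
    rw [G_decompose]; simp
  rw [h1, H_eq_Npre, K_eq_Bsum']
  norm_num

-- ===== VERDICT (by name: the statement is the Claim_ definition above) =====
theorem pre_sum_spec : Claim_equal_pre_sum := by
  intro nums goal _
  unfold Spec_pre_sum
  exact A_eq_B nums goal
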